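-- pv_equiv track=rewrite | github.com/superman2003/anything-proxy | routes/proxy.py | _select_hot_documents
-- ===== SOURCE A (Python) =====
-- def _select_hot_documents(documents: list[dict], latest_user_text: str, current_paths: set[str], limit: int = 4) -> list[dict]:
--     latest_lower = (latest_user_text or "").lower()
--     selected = []
--     seen = set()
--
--     def _maybe_add(item: dict):
--         path = item.get("path")
--         if not path or path in seen:
--             return
--         seen.add(path)
--         selected.append(item)
--
--     for item in documents:
--         if item.get("path") in current_paths:
--             _maybe_add(item)
--             if len(selected) >= limit:
--                 return selected
--
--     for item in documents:
--         basename = (item.get("basename") or "").lower()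
--         path_lower = (item.get("path") or "").lower()
--         if basename and basename in latest_lower or path_lower and path_lower in latest_lower:
--             _maybe_add(item)
--             if len(selected) >= limit:
--                 return selected
--
--     for item in documents:
--         _maybe_add(item)
--         if len(selected) >= limit:
--             return selected
--
--     return selected
-- ===== SOURCE B (Python) =====
-- def _select_hot_documents(documents: list[dict], latest_user_text: str, current_paths: set[str], limit: int = 4) -> list[dict]:
--     latest_lower = (latest_user_text or "").lower()
--
--     def _tier(item: dict) -> int:
--         if item.get("path") in current_paths:
--             return 0
--         basename = (item.get("basename") or "").lower()
--         path_lower = (item.get("path") or "").lower()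
--         if basename and basename in latest_lower or path_lower and path_lower in latest_lower:
--             return 1
--         return 2
--
--     buckets = [[item for item in documents if _tier(item) == k] for k in range(3)]
--
--     selected = []
--     seen = set()
--     for item in buckets[0] + buckets[1] + buckets[2]:
--         path = item.get("path")
--         if path and path not in seen:
--             seen.add(path)
--             selected.append(item)
--         if len(selected) >= limit:
--             break
--     return selected
-- ===== Notes on version B (the rewrite author's own statement) =====
-- stated objective: alternative
-- what changed: A makes three separate prioritized scans over documents (each re-testing its condition and deduplicating on the fly); B classifies every document once into one of three tier buckets and then makes a single merged dedup-and-limit pass over bucket0 ++ bucket1 ++ bucket2.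
import Mathlib
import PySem

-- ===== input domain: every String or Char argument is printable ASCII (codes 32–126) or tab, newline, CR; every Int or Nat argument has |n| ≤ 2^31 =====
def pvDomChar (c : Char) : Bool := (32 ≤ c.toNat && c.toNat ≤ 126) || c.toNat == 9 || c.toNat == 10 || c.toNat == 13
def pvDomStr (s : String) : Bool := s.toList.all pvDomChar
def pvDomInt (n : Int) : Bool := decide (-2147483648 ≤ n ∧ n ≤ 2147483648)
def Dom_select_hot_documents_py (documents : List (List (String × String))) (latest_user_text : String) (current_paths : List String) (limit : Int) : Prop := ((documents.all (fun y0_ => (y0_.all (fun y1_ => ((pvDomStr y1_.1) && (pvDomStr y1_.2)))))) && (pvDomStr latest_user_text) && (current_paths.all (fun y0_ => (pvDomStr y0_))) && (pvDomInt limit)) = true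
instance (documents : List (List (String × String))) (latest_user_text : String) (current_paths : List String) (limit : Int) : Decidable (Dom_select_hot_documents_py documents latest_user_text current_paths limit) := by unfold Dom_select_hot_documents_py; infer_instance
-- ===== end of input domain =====

-- B replaces A's three repeated scans over `documents` by one classification pass into three
-- tier buckets plus one merged dedup/limit pass (objective: alternative decomposition, same cost).

-- ===== PORT A =====

-- item.get(k) on a Python dict (assoc list, first match)
def pvGet (item : List (String × String)) (k : String) : Option String :=
  (PySem.Dict.mk item).get? k

-- the shared `_maybe_add` closure: skip falsy or seen path, else record path and append item
def pvMaybeAdd (item : List (String × String))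
    (st : List (List (String × String)) × PySem.Set String) :
    List (List (String × String)) × PySem.Set String :=
  match pvGet item "path" with
  | none => st
  | some p =>
    if p = "" then st
    else if PySem.Set.contains st.2 p then st
    else (st.1 ++ [item], PySem.Set.add st.2 p)

-- `item.get("path") in current_paths` (None is never in a set of strings)
def pvInCurrent (item : List (String × String)) (current_paths : List String) : Bool :=
  match pvGet item "path" with
  | none => false
  | some p => PySem.Set.contains current_paths p

-- the text-match condition of A's second loop, with Python's and/or precedence
def pvTextMatch (item : List (String × String)) (latest_lower : String) : Bool :=
  let basename := PySem.Str.lower ((pvGet item "basename").getD "")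
  let path_lower := PySem.Str.lower ((pvGet item "path").getD "")
  (!(basename == "") && PySem.Str.isIn basename latest_lower) ||
  (!(path_lower == "") && PySem.Str.isIn path_lower latest_lower)

-- one of A's `for item in documents:` loops: items passing `cond` get `_maybe_add` and the
-- `len(selected) >= limit` early return (.error = early `return selected`)
def pvRunE (cond : List (String × String) → Bool) (limit : Int) :
    List (List (String × String)) →
    List (List (String × String)) × PySem.Set String →
    Except (List (List (String × String))) (List (List (String × String)) × PySem.Set String)
  | [], st => .ok st
  | item :: rest, st =>
    if cond item then
      let st' := pvMaybeAdd item st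
      if limit ≤ (st'.1.length : Int) then .error st'.1
      else pvRunE cond limit rest st'
    else pvRunE cond limit rest st

def select_hot_documents_py (documents : List (List (String × String))) (latest_user_text : String) (current_paths : List String) (limit : Int) : List (List (String × String)) :=
  let latest_lower := PySem.Str.lower latest_user_text
  match pvRunE (fun item => pvInCurrent item current_paths) limit documents ([], PySem.Set.empty) with
  | .error r => r
  | .ok st1 =>
    match pvRunE (fun item => pvTextMatch item latest_lower) limit documents st1 with
    | .error r => r
    | .ok st2 =>
      match pvRunE (fun _ => true) limit documents st2 with
      | .error r => r
      | .ok st3 => st3.1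

-- ===== PORT B =====

-- B's `_tier`: 0 = in current_paths, 1 = text match, 2 = rest
def pvTier (item : List (String × String)) (latest_lower : String) (current_paths : List String) : Int :=
  if pvInCurrent item current_paths then 0
  else if pvTextMatch item latest_lower then 1
  else 2

-- B's loop body: append item if its path is truthy and unseen
def pvStepB (item : List (String × String))
    (st : List (List (String × String)) × PySem.Set String) :
    List (List (String × String)) × PySem.Set String :=
  match pvGet item "path" with
  | some p =>
    if !(p == "") && !PySem.Set.contains st.2 p then (st.1 ++ [item], PySem.Set.add st.2 p)
    else st
  | none => st

-- B's merged dedup pass with `break` once len(selected) >= limit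
def pvRunB (limit : Int) :
    List (List (String × String)) →
    List (List (String × String)) × PySem.Set String →
    List (List (String × String))
  | [], st => st.1
  | item :: rest, st =>
    let st' := pvStepB item st
    if limit ≤ (st'.1.length : Int) then st'.1
    else pvRunB limit rest st'

def select_hot_documents_py_alt (documents : List (List (String × String))) (latest_user_text : String) (current_paths : List String) (limit : Int) : List (List (String × String)) :=
  let latest_lower := PySem.Str.lower latest_user_text
  let b0 := documents.filter (fun item => pvTier item latest_lower current_paths == 0)
  let b1 := documents.filter (fun item => pvTier item latest_lower current_paths == 1)
  let b2 := documents.filter (fun item => pvTier item latest_lower current_paths == 2)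
  pvRunB limit (b0 ++ b1 ++ b2) ([], PySem.Set.empty)

-- ===== PRECONDITION & SPEC =====
def Spec_select_hot_documents_py (documents : List (List (String × String))) (latest_user_text : String) (current_paths : List String) (limit : Int) (out : List (List (String × String))) : Prop := out = select_hot_documents_py_alt documents latest_user_text current_paths limit
instance (documents : List (List (String × String))) (latest_user_text : String) (current_paths : List String) (limit : Int) (out : List (List (String × String))) : Decidable (Spec_select_hot_documents_py documents latest_user_text current_paths limit out) := by unfold Spec_select_hot_documents_py; infer_instance

-- ===== CLAIM (what is proved, stated in full; the proofs are below) =====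
def Claim_equal_select_hot_documents_py : Prop := ∀ (documents : List (List (String × String))) (latest_user_text : String) (current_paths : List String) (limit : Int), Dom_select_hot_documents_py documents latest_user_text current_paths limit → Spec_select_hot_documents_py documents latest_user_text current_paths limit (select_hot_documents_py documents latest_user_text current_paths limit)

-- ===== LEMMAS AND PROOFS =====

-- an item is inert for `_maybe_add`: its path is absent, falsy, or already seen
def pvNoOp (item : List (String × String)) (seen : PySem.Set String) : Prop :=
  match pvGet item "path" with
  | none => True
  | some p => p = "" ∨ p ∈ seen

theorem pvMaybeAdd_of_noop (item : List (String × String)) (st : List (List (String × String)) × PySem.Set String)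
    (h : pvNoOp item st.2) : pvMaybeAdd item st = st := by
  unfold pvNoOp at h
  unfold pvMaybeAdd
  cases hg : pvGet item "path" with
  | none => rfl
  | some p =>
    rw [hg] at h
    simp only []
    split_ifs with h1 h2
    · rfl
    · rfl
    · rcases h with h | h
      · exact absurd h h1
      · exact absurd ((PySem.Set.contains_iff st.2 p).2 h) (by simpa using h2)

theorem pvMaybeAdd_seen_mono (item : List (String × String)) (st : List (List (String × String)) × PySem.Set String)
    (q : String) (h : q ∈ st.2) : q ∈ (pvMaybeAdd item st).2 := by
  unfold pvMaybeAdd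
  cases hg : pvGet item "path" with
  | none => exact h
  | some p =>
    simp only []
    split_ifs with h1 h2
    · exact h
    · exact h
    · exact (PySem.Set.mem_add st.2 p q).2 (Or.inl h)

theorem pvNoOp_mono (item y : List (String × String)) (st : List (List (String × String)) × PySem.Set String)
    (h : pvNoOp item st.2) : pvNoOp item (pvMaybeAdd y st).2 := by
  unfold pvNoOp at *
  cases hg : pvGet item "path" with
  | none => trivial
  | some p =>
    rw [hg] at h
    rcases h with h | h
    · exact Or.inl h
    · exact Or.inr (pvMaybeAdd_seen_mono y st p h)

theorem pvMaybeAdd_self_noop (item : List (String × String)) (st : List (List (String × String)) × PySem.Set String) :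
    pvNoOp item (pvMaybeAdd item st).2 := by
  unfold pvNoOp pvMaybeAdd
  cases hg : pvGet item "path" with
  | none => trivial
  | some p =>
    simp only []
    split_ifs with h1 h2
    · exact Or.inl h1
    · exact Or.inr ((PySem.Set.contains_iff st.2 p).1 h2)
    · exact Or.inr ((PySem.Set.mem_add st.2 p p).2 (Or.inr rfl))

-- runE with a condition = runE over the condition's filter
theorem pvRunE_filter (cond : List (String × String) → Bool) (limit : Int)
    (xs : List (List (String × String))) (st : List (List (String × String)) × PySem.Set String) :
    pvRunE cond limit xs st = pvRunE (fun _ => true) limit (xs.filter cond) st := by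
  induction xs generalizing st with
  | nil => rfl
  | cons x rest ih =>
    by_cases hc : cond x
    · simp [pvRunE, hc, ih]
    · simp [pvRunE, hc, ih]

-- runE over an append composes through Except
theorem pvRunE_append (cond : List (String × String) → Bool) (limit : Int)
    (xs ys : List (List (String × String))) (st : List (List (String × String)) × PySem.Set String) :
    pvRunE cond limit (xs ++ ys) st =
      match pvRunE cond limit xs st with
      | .error r => .error r
      | .ok st' => pvRunE cond limit ys st' := by
  induction xs generalizing st with
  | nil => rfl
  | cons x rest ih =>
    by_cases hc : cond x <;>
      simp only [List.cons_append, pvRunE, hc, if_true]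
    · split
      · rfl
      · exact ih _
    · exact ih st

theorem pvRunE_true_ok_mono (limit : Int) (xs : List (List (String × String)))
    (st st' : List (List (String × String)) × PySem.Set String)
    (h : pvRunE (fun _ => true) limit xs st = .ok st') (q : String) (hq : q ∈ st.2) : q ∈ st'.2 := by
  induction xs generalizing st with
  | nil => simp [pvRunE] at h; rw [← h]; exact hq
  | cons x rest ih =>
    simp only [pvRunE, if_true] at h
    split at h
    · exact absurd h (by simp)
    · exact ih _ h (pvMaybeAdd_seen_mono x st q hq)

theorem pvNoOp_runE_mono (limit : Int) (xs : List (List (String × String)))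
    (item : List (String × String)) (st st' : List (List (String × String)) × PySem.Set String)
    (h : pvRunE (fun _ => true) limit xs st = .ok st') (hn : pvNoOp item st.2) : pvNoOp item st'.2 := by
  unfold pvNoOp at *
  cases hg : pvGet item "path" with
  | none => trivial
  | some p =>
    rw [hg] at hn
    rcases hn with h1 | h1
    · exact Or.inl h1
    · exact Or.inr (pvRunE_true_ok_mono limit xs st st' h p h1)

-- after a completed (no early return) unconditional pass, every visited item is inert
theorem pvRunE_true_ok_noop (limit : Int) (xs : List (List (String × String)))
    (st st' : List (List (String × String)) × PySem.Set String)
    (h : pvRunE (fun _ => true) limit xs st = .ok st') :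
    ∀ x ∈ xs, pvNoOp x st'.2 := by
  induction xs generalizing st with
  | nil => intro x hx; simp at hx
  | cons y rest ih =>
    intro x hx
    simp only [pvRunE, if_true] at h
    split at h
    · exact absurd h (by simp)
    · rcases List.mem_cons.1 hx with rfl | hx'
      · exact pvNoOp_runE_mono limit rest x _ st' h (pvMaybeAdd_self_noop x st)
      · exact ih _ h x hx'

-- a completed nonempty unconditional pass leaves len(selected) < limit
theorem pvRunE_true_ok_lt (limit : Int) (x : List (String × String)) (xs : List (List (String × String)))
    (st st' : List (List (String × String)) × PySem.Set String)
    (h : pvRunE (fun _ => true) limit (x :: xs) st = .ok st') :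
    (st'.1.length : Int) < limit := by
  induction xs generalizing x st with
  | nil =>
    simp only [pvRunE, if_true] at h
    split at h
    · exact absurd h (by simp)
    · next hlt =>
        cases h
        omega
  | cons y rest ih =>
    simp only [pvRunE, if_true] at h
    split at h
    · exact absurd h (by simp)
    · exact ih y _ h

-- inert items that fail Q can be dropped from an unconditional pass
theorem pvRunE_drop (Q : List (String × String) → Bool) (limit : Int)
    (xs : List (List (String × String))) (st : List (List (String × String)) × PySem.Set String)
    (hlt : (st.1.length : Int) < limit)
    (hno : ∀ x ∈ xs, Q x = false → pvNoOp x st.2) :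
    pvRunE (fun _ => true) limit xs st = pvRunE (fun _ => true) limit (xs.filter Q) st := by
  induction xs generalizing st with
  | nil => rfl
  | cons x rest ih =>
    by_cases hq : Q x
    · simp only [List.filter_cons, hq, if_true, pvRunE]
      split
      · rfl
      · next h =>
        have hlt' : ((pvMaybeAdd x st).1.length : Int) < limit := by omega
        exact ih (pvMaybeAdd x st) hlt'
          (fun y hy hqy => pvNoOp_mono y x st (hno y (List.mem_cons_of_mem x hy) hqy))
    · have hx : pvMaybeAdd x st = st :=
        pvMaybeAdd_of_noop x st (hno x (List.mem_cons_self) (by simp [hq]))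
      have hnle : ¬ limit ≤ (st.1.length : Int) := by omega
      simp only [List.filter_cons, hq, pvRunE, hx, Bool.false_eq_true, if_false, ite_true, hnle]
      exact ih st hlt (fun y hy hqy => hno y (List.mem_cons_of_mem x hy) hqy)

-- B's loop is the run/extract of the Except loop
theorem pvStepB_eq (item : List (String × String)) (st : List (List (String × String)) × PySem.Set String) :
    pvStepB item st = pvMaybeAdd item st := by
  unfold pvStepB pvMaybeAdd
  cases pvGet item "path" with
  | none => rfl
  | some p =>
    by_cases h1 : p = ""
    · simp [h1]
    · simp [h1]

theorem pvRunB_eq (limit : Int) (xs : List (List (String × String)))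
    (st : List (List (String × String)) × PySem.Set String) :
    pvRunB limit xs st =
      match pvRunE (fun _ => true) limit xs st with
      | .error r => r
      | .ok st' => st'.1 := by
  induction xs generalizing st with
  | nil => rfl
  | cons x rest ih =>
    simp only [pvRunB, pvRunE, pvStepB_eq, if_true]
    split
    · rfl
    · exact ih _

-- tier characterisations
theorem pvTier_zero (item : List (String × String)) (lt : String) (cps : List String) :
    (pvTier item lt cps == 0) = pvInCurrent item cps := by
  unfold pvTier
  by_cases h0 : pvInCurrent item cps <;> by_cases h1 : pvTextMatch item lt <;> simp [h0, h1]

theorem pvTier_one (item : List (String × String)) (lt : String) (cps : List String) :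
    (pvTier item lt cps == 1) = (!pvInCurrent item cps && pvTextMatch item lt) := by
  unfold pvTier
  by_cases h0 : pvInCurrent item cps <;> by_cases h1 : pvTextMatch item lt <;> simp [h0, h1]

theorem pvTier_two (item : List (String × String)) (lt : String) (cps : List String) :
    (pvTier item lt cps == 2) = (!pvInCurrent item cps && !pvTextMatch item lt) := by
  unfold pvTier
  by_cases h0 : pvInCurrent item cps <;> by_cases h1 : pvTextMatch item lt <;> simp [h0, h1]


-- the core equivalence: A's three-loop pipeline equals B's bucket run
theorem pv_core (docs : List (List (String × String))) (lt : String)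
    (cps : List String) (limit : Int) :
    (match pvRunE (fun item => pvInCurrent item cps) limit docs ([], PySem.Set.empty) with
     | .error r => r
     | .ok st1 =>
       match pvRunE (fun item => pvTextMatch item lt) limit docs st1 with
       | .error r => r
       | .ok st2 =>
         match pvRunE (fun _ => true) limit docs st2 with
         | .error r => r
         | .ok st3 => st3.1) =
    pvRunB limit
      ((docs.filter (fun item => pvTier item lt cps == 0)) ++
        (docs.filter (fun item => pvTier item lt cps == 1)) ++
        (docs.filter (fun item => pvTier item lt cps == 2)))
      ([], PySem.Set.empty) := by
  rw [pvRunB_eq]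
  have hb0 : docs.filter (fun item => pvTier item lt cps == 0) =
      docs.filter (fun item => pvInCurrent item cps) :=
    List.filter_congr (fun i _ => pvTier_zero i lt cps)
  have hb1 : docs.filter (fun item => pvTier item lt cps == 1) =
      docs.filter (fun item => !pvInCurrent item cps && pvTextMatch item lt) :=
    List.filter_congr (fun i _ => pvTier_one i lt cps)
  have hb2 : docs.filter (fun item => pvTier item lt cps == 2) =
      docs.filter (fun item => !pvInCurrent item cps && !pvTextMatch item lt) :=
    List.filter_congr (fun i _ => pvTier_two i lt cps)
  rw [hb0, hb1, hb2, pvRunE_append, pvRunE_append,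
    pvRunE_filter (fun item => pvInCurrent item cps) limit docs]
  cases hE0 : pvRunE (fun _ => true) limit
      (docs.filter (fun item => pvInCurrent item cps)) ([], PySem.Set.empty) with
  | error r => rfl
  | ok st1 =>
    have h21 : pvRunE (fun item => pvTextMatch item lt) limit docs st1 =
        pvRunE (fun _ => true) limit
          (docs.filter (fun item => !pvInCurrent item cps && pvTextMatch item lt)) st1 := by
      rw [pvRunE_filter (fun item => pvTextMatch item lt) limit docs]
      by_cases h0 : docs.filter (fun item => pvInCurrent item cps) = []
      · have hall := List.filter_eq_nil_iff.1 h0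
        exact congrArg (fun l => pvRunE (fun _ => true) limit l st1)
          (List.filter_congr (fun i hi => by
            have h0 : pvInCurrent i cps = false := by simpa using hall i hi
            simp [h0]))
      · obtain ⟨a, as, hcons⟩ := List.exists_cons_of_ne_nil h0
        rw [hcons] at hE0
        have hlt1 : (st1.1.length : Int) < limit := pvRunE_true_ok_lt limit a as _ st1 hE0
        have hnoop := pvRunE_true_ok_noop limit (a :: as) _ st1 hE0
        have hdrop := pvRunE_drop (fun item => !pvInCurrent item cps) limit
          (docs.filter (fun item => pvTextMatch item lt)) st1 hlt1
          (fun x hx hqx => hnoop x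
            (hcons ▸ List.mem_filter.2 ⟨(List.mem_filter.1 hx).1, by simpa using hqx⟩))
        rw [hdrop, List.filter_filter]
    dsimp only
    rw [h21]
    cases hE1 : pvRunE (fun _ => true) limit
        (docs.filter (fun item => !pvInCurrent item cps && pvTextMatch item lt)) st1 with
    | error r => rfl
    | ok st2 =>
      have h32 : pvRunE (fun _ => true) limit docs st2 =
          pvRunE (fun _ => true) limit
            (docs.filter (fun item => !pvInCurrent item cps && !pvTextMatch item lt)) st2 := by
        by_cases hboth : docs.filter (fun item => pvInCurrent item cps) = [] ∧
            docs.filter (fun item => !pvInCurrent item cps && pvTextMatch item lt) = []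
        · -- every item is tier 2: the filter is the whole list
          have hall0 := List.filter_eq_nil_iff.1 hboth.1
          have hall1 := List.filter_eq_nil_iff.1 hboth.2
          have : docs.filter (fun item => !pvInCurrent item cps && !pvTextMatch item lt) = docs := by
            apply List.filter_eq_self.2
            intro x hx
            have h0 : pvInCurrent x cps = false := by simpa using hall0 x hx
            have h1 : pvTextMatch x lt = false := by
              have := hall1 x hx
              simp [h0] at this
              exact this
            simp [h0, h1]
          rw [this]
        · -- some earlier bucket is nonempty, so len(selected) < limit after loop 2
          have hlt2 : (st2.1.length : Int) < limit := by
            by_cases h1 : docs.filter (fun item => !pvInCurrent item cps && pvTextMatch item lt) = []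
            · have h0 : docs.filter (fun item => pvInCurrent item cps) ≠ [] := by
                intro hc; exact hboth ⟨hc, h1⟩
              obtain ⟨a, as, hcons⟩ := List.exists_cons_of_ne_nil h0
              rw [hcons] at hE0
              rw [h1] at hE1
              cases hE1
              exact pvRunE_true_ok_lt limit a as _ _ hE0
            · obtain ⟨a, as, hcons⟩ := List.exists_cons_of_ne_nil h1
              rw [hcons] at hE1
              exact pvRunE_true_ok_lt limit a as _ st2 hE1
          have hnoop1 := pvRunE_true_ok_noop limit _ _ st2 hE1
          have hnoop0 : ∀ x ∈ docs.filter (fun item => pvInCurrent item cps), pvNoOp x st2.2 :=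
            fun x hx => pvNoOp_runE_mono limit _ x st1 st2 hE1
              (pvRunE_true_ok_noop limit _ _ st1 hE0 x hx)
          have hdrop := pvRunE_drop (fun item => !pvInCurrent item cps && !pvTextMatch item lt)
            limit docs st2 hlt2 (fun x hx hqx => by
              rcases Bool.and_eq_false_iff.1 hqx with hq | hq
              · exact hnoop0 x (List.mem_filter.2 ⟨hx, by simpa using hq⟩)
              · by_cases h0 : pvInCurrent x cps
                · exact hnoop0 x (List.mem_filter.2 ⟨hx, h0⟩)
                · exact hnoop1 x (List.mem_filter.2 ⟨hx, by simp [h0]; simpa using hq⟩))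
          rw [hdrop]
      dsimp only
      rw [h32]

-- ===== VERDICT (by name: the statement is the Claim_ definition above) =====
theorem select_hot_documents_py_spec : Claim_equal_select_hot_documents_py := by
  intro documents latest_user_text current_paths limit _
  unfold Spec_select_hot_documents_py select_hot_documents_py select_hot_documents_py_alt
  exact pv_core documents (PySem.Str.lower latest_user_text) current_paths limit
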